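-- pv_equiv track=rewrite | github.com/danielsofran/UBB | A1/Semestrul 1/FP/Lab/lab3/Tema/Tema/secvente.py | dif_prima
-- ===== SOURCE A (Python) =====
-- def prim(n): # verifica daca numarul este prim
--     i = 2
--     if n == 2: return True
--     if n < 2: return False
--     while i*i<=n:
--         if n%i==0:
--             return False
--         i = i + 1
--     return True
--
-- def dif_prima(lista):
--     # returneaza secventele de lungime maxima care au diferenta elementelor prima
--     rez = []
--     l = []
--     lmax = 2
--     if len(lista)==0: return rez
--     for i in range(0, len(lista)-1):
--         l.append(lista[i])
--         if not prim(abs(lista[i+1]-lista[i])):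
--             if len(l)>lmax:
--                 rez.clear()
--                 rez.append(l)
--                 lmax = len(l)
--             elif len(l)==lmax:
--                 rez.append(l)
--             l = []
--     l.append(lista[len(lista)-1])
--     if len(l)>lmax:
--         rez.clear()
--         rez.append(l)
--         lmax = len(l)
--     elif len(l)==lmax:
--         rez.append(l)
--     return rez
-- ===== SOURCE B (Python) =====
-- def prim(n):
--     if n < 2:
--         return False
--     d = 2
--     while d * d <= n:
--         if n % d == 0:
--             return False
--         d += 1
--     return True
--
-- def dif_prima(lista):
--     # phase 1: split into maximal runs whose consecutive differences are prime
--     if not lista: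
--         return []
--     runs = []
--     cur = [lista[0]]
--     for prev, x in zip(lista, lista[1:]):
--         if prim(abs(x - prev)):
--             cur.append(x)
--         else:
--             runs.append(cur)
--             cur = [x]
--     runs.append(cur)
--     # phase 2: keep the runs of maximal length, with the fixed floor 2
--     m = max(2, max(len(r) for r in runs))
--     return [r for r in runs if len(r) == m]
-- ===== Notes on version B (the rewrite author's own statement) =====
-- stated objective: simpler
-- what changed: Replaces A's interleaved replace-or-append bookkeeping with running lmax and rez.clear() by two clean phases: split the list once into maximal runs with prime consecutive differences, then filter the runs whose length equals max(2, longest run).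
import Mathlib
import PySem

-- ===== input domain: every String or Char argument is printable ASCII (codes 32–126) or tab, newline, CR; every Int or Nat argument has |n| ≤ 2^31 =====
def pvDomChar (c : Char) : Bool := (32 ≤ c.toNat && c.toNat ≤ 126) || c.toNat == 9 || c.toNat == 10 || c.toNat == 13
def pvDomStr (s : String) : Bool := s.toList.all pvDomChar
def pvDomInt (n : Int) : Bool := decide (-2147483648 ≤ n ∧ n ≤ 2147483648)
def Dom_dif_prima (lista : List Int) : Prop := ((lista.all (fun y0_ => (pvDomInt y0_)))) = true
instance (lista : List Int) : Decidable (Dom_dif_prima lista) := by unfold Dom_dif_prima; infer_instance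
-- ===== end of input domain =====

-- B replaces A's interleaved replace-or-append bookkeeping (running lmax, rez.clear()) by two
-- phases: split into maximal prime-difference runs, then filter runs of length max(2, longest).

-- ===== PORT A =====
-- while i*i<=n: … i=i+1   (terminates because i*i grows past n)
def primLoopA (n : Int) (i : Nat) : Bool :=
  if _h : ((i : Int) * i) ≤ n then
    (if PySem.Int.mod n (i : Int) = 0 then false else primLoopA n (i + 1))
  else true
termination_by (n + 1 - (i : Int) * i).toNat
decreasing_by
  have h2 : (((i + 1 : Nat)) : Int) * ((i + 1 : Nat) : Int) = (i : Int) * i + 2 * i + 1 := by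
    push_cast; ring
  omega

def primA (n : Int) : Bool :=
  if n = 2 then true
  else if n < 2 then false
  else primLoopA n 2

-- the in-range lista[i] / lista[i+1] / lista[len(lista)-1] are ported with pyGetD (default never read)
def dif_prima (lista : List Int) : List (List Int) :=
  if lista.length = 0 then []
  else
    let s := (PySem.List.pyRange 0 ((lista.length : Int) - 1) 1).foldl
      (fun (s : List (List Int) × List Int × Nat) i =>
        let l := s.2.1 ++ [PySem.List.pyGetD lista i 0]
        if ¬ primA |PySem.List.pyGetD lista (i + 1) 0 - PySem.List.pyGetD lista i 0| then
          (if l.length > s.2.2 then ([l], [], l.length)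
           else if l.length = s.2.2 then (s.1 ++ [l], [], s.2.2)
           else (s.1, [], s.2.2))
        else (s.1, l, s.2.2))
      ([], [], 2)
    let l := s.2.1 ++ [PySem.List.pyGetD lista ((lista.length : Int) - 1) 0]
    if l.length > s.2.2 then [l]
    else if l.length = s.2.2 then s.1 ++ [l]
    else s.1

-- ===== PORT B =====
def primLoopB (n : Int) (d : Nat) : Bool :=
  if _h : ((d : Int) * d) ≤ n then
    (if PySem.Int.mod n (d : Int) = 0 then false else primLoopB n (d + 1))
  else true
termination_by (n + 1 - (d : Int) * d).toNat
decreasing_by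
  have h2 : (((d + 1 : Nat)) : Int) * ((d + 1 : Nat) : Int) = (d : Int) * d + 2 * d + 1 := by
    push_cast; ring
  omega

def primB (n : Int) : Bool :=
  if n < 2 then false else primLoopB n 2

def dif_prima_alt (lista : List Int) : List (List Int) :=
  match lista with
  | [] => []
  | x :: xs =>
    -- phase 1: split into maximal runs with prime consecutive differences
    let s := (List.zip (x :: xs) xs).foldl
      (fun (s : List (List Int) × List Int) p =>
        if primB |p.2 - p.1| then (s.1, s.2 ++ [p.2])
        else (s.1 ++ [s.2], [p.2]))
      ([], [x])
    let runs := s.1 ++ [s.2]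
    -- phase 2: keep the runs of maximal length, with the fixed floor 2
    let m := max 2 ((runs.map List.length).foldl max 0)
    runs.filter (fun r => r.length = m)

-- ===== PRECONDITION & SPEC =====
def Spec_dif_prima (lista : List Int) (out : List (List Int)) : Prop := out = dif_prima_alt lista
instance (lista : List Int) (out : List (List Int)) : Decidable (Spec_dif_prima lista out) := by unfold Spec_dif_prima; infer_instance

-- ===== CLAIM (what is proved, stated in full; the proofs are below) =====
def Claim_equal_dif_prima : Prop := ∀ (lista : List Int), Dom_dif_prima lista → Spec_dif_prima lista (dif_prima lista)

-- ===== LEMMAS AND PROOFS =====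

-- the two trial-division loops coincide
theorem primLoop_eq (n : Int) (i : Nat) : primLoopA n i = primLoopB n i := by
  fun_induction primLoopA n i <;> (rw [primLoopB]; simp [*])

theorem prim_eq (n : Int) : primA n = primB n := by
  unfold primA primB
  by_cases h2 : n = 2
  · subst h2; norm_num; rw [primLoopB]; norm_num
  · by_cases hlt : n < 2 <;> simp [h2, hlt, primLoop_eq]

-- running maximum run length with A's fixed floor 2
def pvM (acc : List (List Int)) : Nat := (acc.map List.length).foldl max 2
-- the runs of maximal length
def pvF (acc : List (List Int)) : List (List Int) := acc.filter (fun r => r.length = pvM acc)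
-- the maximal runs of prime consecutive differences, built directly
def pvRuns (x : Int) (xs : List Int) (cur : List Int) : List (List Int) :=
  match xs with
  | [] => [cur ++ [x]]
  | y :: ys =>
    if primB |y - x| then pvRuns y ys (cur ++ [x])
    else (cur ++ [x]) :: pvRuns y ys []

-- A's loop body and final flush, named
def stA (s : List (List Int) × List Int × Nat) (p : Int × Int) : List (List Int) × List Int × Nat :=
  let l := s.2.1 ++ [p.1]
  if ¬ primA |p.2 - p.1| then
    (if l.length > s.2.2 then ([l], [], l.length)
     else if l.length = s.2.2 then (s.1 ++ [l], [], s.2.2)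
     else (s.1, [], s.2.2))
  else (s.1, l, s.2.2)

def pvFin (s : List (List Int) × List Int × Nat) (z : Int) : List (List Int) :=
  let l := s.2.1 ++ [z]
  if l.length > s.2.2 then [l]
  else if l.length = s.2.2 then s.1 ++ [l]
  else s.1

-- B's loop body, named
def stB (s : List (List Int) × List Int) (p : Int × Int) : List (List Int) × List Int :=
  if primB |p.2 - p.1| then (s.1, s.2 ++ [p.2])
  else (s.1 ++ [s.2], [p.2])

theorem foldl_max_max (L : List Nat) : ∀ a b : Nat, L.foldl max (max a b) = max a (L.foldl max b) := by
  induction L with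
  | nil => intro a b; simp
  | cons c t ih =>
    intro a b
    simp only [List.foldl_cons, Nat.max_assoc]
    exact ih a (max b c)

theorem mem_le_pvM (acc : List (List Int)) (r : List Int) (h : r ∈ acc) : r.length ≤ pvM acc := by
  induction acc with
  | nil => cases h
  | cons a t ih =>
    unfold pvM at *
    simp only [List.map_cons, List.foldl_cons]
    rcases List.mem_cons.mp h with h | h
    · subst h
      have := foldl_max_max (t.map List.length) r.length 2
      rw [Nat.max_comm 2 r.length, this]; omega
    · have := ih h
      have h2 := foldl_max_max (t.map List.length) a.length 2
      rw [Nat.max_comm 2 a.length, h2]; omega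

theorem pvM_append (acc : List (List Int)) (l : List Int) :
    pvM (acc ++ [l]) = max (pvM acc) l.length := by
  unfold pvM
  rw [List.map_append, List.foldl_append]
  simp [Nat.max_comm]

theorem pvF_append_gt (acc : List (List Int)) (l : List Int) (h : pvM acc < l.length) :
    pvF (acc ++ [l]) = [l] := by
  have hM : pvM (acc ++ [l]) = l.length := by rw [pvM_append]; omega
  unfold pvF
  rw [List.filter_append, hM]
  have hnil : (acc.filter (fun r => decide (r.length = l.length))) = [] := by
    rw [List.filter_eq_nil_iff]
    intro r hr
    have := mem_le_pvM acc r hr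
    simp only [decide_eq_true_eq]; omega
  simp [hnil]

theorem pvF_append_eq (acc : List (List Int)) (l : List Int) (h : l.length = pvM acc) :
    pvF (acc ++ [l]) = pvF acc ++ [l] := by
  have hM : pvM (acc ++ [l]) = pvM acc := by rw [pvM_append]; omega
  unfold pvF
  rw [List.filter_append, hM]
  simp [h]

theorem pvF_append_lt (acc : List (List Int)) (l : List Int) (h : l.length < pvM acc) :
    pvF (acc ++ [l]) = pvF acc := by
  have hM : pvM (acc ++ [l]) = pvM acc := by rw [pvM_append]; omega
  unfold pvF
  rw [List.filter_append, hM]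
  have : l.length ≠ pvM acc := by omega
  simp [this]

-- A's flush block sends the tracked (rez, lmax) for acc to the ones for acc ++ [l]
theorem stA_flush (x y : Int) (acc : List (List Int)) (cur : List Int)
    (hp : ¬ primA |y - x| = true) :
    stA (pvF acc, cur, pvM acc) (x, y)
      = (pvF (acc ++ [cur ++ [x]]), [], pvM (acc ++ [cur ++ [x]])) := by
  show (if ¬ primA |y - x| = true then
          (if (cur ++ [x]).length > pvM acc then ([cur ++ [x]], ([] : List Int), (cur ++ [x]).length)
           else if (cur ++ [x]).length = pvM acc then (pvF acc ++ [cur ++ [x]], ([] : List Int), pvM acc)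
           else (pvF acc, ([] : List Int), pvM acc))
        else (pvF acc, cur ++ [x], pvM acc))
      = (pvF (acc ++ [cur ++ [x]]), [], pvM (acc ++ [cur ++ [x]]))
  rw [if_pos hp]
  rcases Nat.lt_trichotomy (pvM acc) (cur ++ [x]).length with h | h | h
  · rw [if_pos h, pvF_append_gt acc _ h, pvM_append, Nat.max_eq_right (le_of_lt h)]
  · rw [if_neg (by omega), if_pos h.symm, pvF_append_eq acc _ h.symm, pvM_append,
      Nat.max_eq_left (by omega)]
  · rw [if_neg (by omega), if_neg (by omega), pvF_append_lt acc _ h, pvM_append,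
      Nat.max_eq_left (by omega)]

theorem stA_keep (x y : Int) (r : List (List Int)) (c : List Int) (m : Nat)
    (hp : primA |y - x| = true) :
    stA (r, c, m) (x, y) = (r, c ++ [x], m) := by
  simp [stA, hp]

theorem pvFin_flush (acc : List (List Int)) (cur : List Int) (z : Int) :
    pvFin (pvF acc, cur, pvM acc) z = pvF (acc ++ [cur ++ [z]]) := by
  show (if (cur ++ [z]).length > pvM acc then [cur ++ [z]]
        else if (cur ++ [z]).length = pvM acc then pvF acc ++ [cur ++ [z]]
        else pvF acc) = pvF (acc ++ [cur ++ [z]])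
  rcases Nat.lt_trichotomy (pvM acc) (cur ++ [z]).length with h | h | h
  · rw [if_pos h, pvF_append_gt acc _ h]
  · rw [if_neg (by omega), if_pos h.symm, pvF_append_eq acc _ h.symm]
  · rw [if_neg (by omega), if_neg (by omega), pvF_append_lt acc _ h]

-- A's fold over the zipped consecutive pairs, plus the final flush, filters the runs
theorem A_fold_runs (xs : List Int) : ∀ (x : Int) (acc : List (List Int)) (cur : List Int),
    pvFin ((List.zip (x :: xs) xs).foldl stA (pvF acc, cur, pvM acc))
        ((x :: xs).getLast (by simp))
      = pvF (acc ++ pvRuns x xs cur) := by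
  induction xs with
  | nil =>
    intro x acc cur
    simp only [List.zip_nil_right, List.foldl_nil, List.getLast_singleton, pvRuns]
    exact pvFin_flush acc cur x
  | cons y ys ih =>
    intro x acc cur
    simp only [List.zip_cons_cons, List.foldl_cons]
    rw [show (x :: y :: ys).getLast (by simp) = (y :: ys).getLast (by simp) from rfl]
    by_cases hp : primA |y - x| = true
    · rw [stA_keep x y _ _ _ hp]
      have hruns : pvRuns x (y :: ys) cur = pvRuns y ys (cur ++ [x]) := by
        rw [show pvRuns x (y :: ys) cur = if primB |y - x| then pvRuns y ys (cur ++ [x])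
            else (cur ++ [x]) :: pvRuns y ys [] from rfl,
          if_pos (by rw [← prim_eq]; exact hp)]
      rw [hruns]
      exact ih y acc (cur ++ [x])
    · rw [stA_flush x y acc cur hp]
      have hruns : pvRuns x (y :: ys) cur = (cur ++ [x]) :: pvRuns y ys [] := by
        rw [show pvRuns x (y :: ys) cur = if primB |y - x| then pvRuns y ys (cur ++ [x])
            else (cur ++ [x]) :: pvRuns y ys [] from rfl,
          if_neg (by rw [← prim_eq]; exact hp)]
      rw [hruns, show acc ++ ((cur ++ [x]) :: pvRuns y ys []) = (acc ++ [cur ++ [x]]) ++ pvRuns y ys [] by simp]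
      exact ih y (acc ++ [cur ++ [x]]) []

-- B's fold builds exactly the runs appended to the accumulator
theorem B_fold_runs (xs : List Int) : ∀ (x : Int) (acc : List (List Int)) (cur : List Int),
    (let s := (List.zip (x :: xs) xs).foldl stB (acc, cur ++ [x])
     s.1 ++ [s.2]) = acc ++ pvRuns x xs cur := by
  induction xs with
  | nil => intro x acc cur; simp [pvRuns]
  | cons y ys ih =>
    intro x acc cur
    simp only [List.zip_cons_cons, List.foldl_cons, pvRuns]
    by_cases hp : primB |y - x| = true
    · rw [show stB (acc, cur ++ [x]) (x, y) = (acc, (cur ++ [x]) ++ [y]) by simp [stB, hp]]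
      rw [if_pos hp]
      exact ih y acc (cur ++ [x])
    · rw [show stB (acc, cur ++ [x]) (x, y) = (acc ++ [cur ++ [x]], [] ++ [y]) by simp [stB, hp]]
      rw [if_neg hp]
      have := ih y (acc ++ [cur ++ [x]]) []
      rw [this]; simp

-- index fold over getD-pairs equals the fold over zipped consecutive pairs
theorem range_fold_zip {σ : Type} (g : σ → Int → Int → σ) :
    ∀ (lista : List Int) (init : σ),
    (List.range (lista.length - 1)).foldl
        (fun s k => g s (lista.getD k 0) (lista.getD (k + 1) 0)) init
      = (List.zip lista lista.tail).foldl (fun s p => g s p.1 p.2) init := by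
  intro lista
  induction lista with
  | nil => intro init; simp
  | cons x t ih =>
    intro init
    cases t with
    | nil => simp
    | cons y ys =>
      rw [show (x :: y :: ys).length - 1 = ((y :: ys).length - 1) + 1 by simp]
      rw [List.range_succ_eq_map, List.foldl_cons, List.foldl_map, List.tail_cons,
        List.zip_cons_cons, List.foldl_cons]
      simp only [List.getD_cons_zero, List.getD_cons_succ, Nat.succ_eq_add_one]
      exact ih (g init x y)

-- pyRange fold of A is the Nat-range fold
theorem pyRange_fold {σ : Type} (lista : List Int) (g : σ → Int → Int → σ) (init : σ) :
    (PySem.List.pyRange 0 ((lista.length : Int) - 1) 1).foldl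
        (fun s i => g s (PySem.List.pyGetD lista i 0) (PySem.List.pyGetD lista (i + 1) 0)) init
      = (List.range (lista.length - 1)).foldl
        (fun s k => g s (lista.getD k 0) (lista.getD (k + 1) 0)) init := by
  rw [PySem.List.pyRange_one, List.foldl_map]
  have hn : ((lista.length : Int) - 1 - 0).toNat = lista.length - 1 := by omega
  rw [hn]
  congr 1
  funext s k
  have h1 : (0 : Int) + (k : Int) = ((k : Nat) : Int) := by ring
  have h2 : ((k : Int)) + 1 = (((k + 1 : Nat)) : Int) := by push_cast; ring
  rw [h1, h2, PySem.List.pyGetD_natCast, PySem.List.pyGetD_natCast]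

theorem dif_prima_eq_pvF (x : Int) (xs : List Int) :
    dif_prima (x :: xs) = pvF (pvRuns x xs []) := by
  show pvFin ((PySem.List.pyRange 0 (((x :: xs).length : Int) - 1) 1).foldl
      (fun s i => stA s (PySem.List.pyGetD (x :: xs) i 0, PySem.List.pyGetD (x :: xs) (i + 1) 0))
      (pvF [], [], pvM []))
    (PySem.List.pyGetD (x :: xs) (((x :: xs).length : Int) - 1) 0) = pvF (pvRuns x xs [])
  have hlast : PySem.List.pyGetD (x :: xs) (((x :: xs).length : Int) - 1) 0
      = (x :: xs).getLast (by simp) := by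
    have hidx : ((x :: xs).length : Int) - 1 = ((xs.length : Nat) : Int) := by simp
    rw [hidx, PySem.List.pyGetD_natCast,
      List.getD_eq_getElem _ _ (by simp), List.getLast_eq_getElem]
    simp
    rfl
  rw [hlast,
    pyRange_fold (x :: xs) (fun s a b => stA s (a, b)) (pvF [], [], pvM []),
    range_fold_zip (fun s a b => stA s (a, b)) (x :: xs) (pvF [], [], pvM []),
    show (fun (s : List (List Int) × List Int × Nat) (p : Int × Int) => stA s (p.1, p.2)) = stA
      from funext fun s => funext fun p => by cases p; rfl,
    List.tail_cons]
  exact A_fold_runs xs x [] []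

theorem dif_prima_alt_eq_pvF (x : Int) (xs : List Int) :
    dif_prima_alt (x :: xs) = pvF (pvRuns x xs []) := by
  show (let s := (List.zip (x :: xs) xs).foldl stB ([], [] ++ [x])
        let runs := s.1 ++ [s.2]
        runs.filter (fun r => r.length = max 2 ((runs.map List.length).foldl max 0)))
      = pvF (pvRuns x xs [])
  have hruns := B_fold_runs xs x [] []
  simp only at hruns ⊢
  rw [hruns]
  have hM : ∀ runs : List (List Int),
      max 2 ((runs.map List.length).foldl max 0) = pvM runs := by
    intro runs
    unfold pvM
    have := foldl_max_max (runs.map List.length) 2 0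
    simpa using this.symm
  rw [show ([] : List (List Int)) ++ pvRuns x xs [] = pvRuns x xs [] by simp]
  rw [hM]
  rfl

-- ===== VERDICT (by name: the statement is the Claim_ definition above) =====
theorem dif_prima_spec : Claim_equal_dif_prima := by
  intro lista _
  unfold Spec_dif_prima
  cases lista with
  | nil => rfl
  | cons x xs => rw [dif_prima_eq_pvF, dif_prima_alt_eq_pvF]
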